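-- pv_equiv track=rewrite | github.com/gdanj/OC_projet_04 | chess/Models/tournois.py | cleanTour
-- ===== SOURCE A (Python) =====
-- def cleanTour(tour):
--     """remplie la list de zero à partir du premier zero
--     Args:
--         tour ([list])
--
--     Returns:
--         [list]
--     """
--     i = 0
--     zero = False
--     while i < len(tour):
--         if zero:
--             tour[i] = 0
--         if tour[i] == 0:
--             zero = True
--         i += 1
--     return tour
-- ===== SOURCE B (Python) =====
-- def cleanTour(tour):
--     """remplie la list de zero a partir du premier zero.
--
--     Divide and conquer: solve(lo, hi) cleans the segment [lo, hi) and returns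
--     True iff that segment contains a zero.  Clean the left half; if it has a
--     zero, fill the whole right half with zeros, otherwise clean the right half
--     recursively.  Mutates tour in place like the original.
--     """
--     def solve(lo, hi):
--         if hi - lo <= 1:
--             return lo < hi and tour[lo] == 0
--         mid = (lo + hi) // 2
--         if solve(lo, mid):
--             for j in range(mid, hi):
--                 tour[j] = 0
--             return True
--         return solve(mid, hi)
--
--     solve(0, len(tour))
--     return tour
-- ===== Notes on version B (the rewrite author's own statement) =====
-- stated objective: alternative
-- what changed: Replaces A's single flag-carrying left-to-right pass with a divide-and-conquer recursion: clean the left half, and if it contains a zero bulk-fill the right half, else recurse on the right half.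
import Mathlib
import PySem

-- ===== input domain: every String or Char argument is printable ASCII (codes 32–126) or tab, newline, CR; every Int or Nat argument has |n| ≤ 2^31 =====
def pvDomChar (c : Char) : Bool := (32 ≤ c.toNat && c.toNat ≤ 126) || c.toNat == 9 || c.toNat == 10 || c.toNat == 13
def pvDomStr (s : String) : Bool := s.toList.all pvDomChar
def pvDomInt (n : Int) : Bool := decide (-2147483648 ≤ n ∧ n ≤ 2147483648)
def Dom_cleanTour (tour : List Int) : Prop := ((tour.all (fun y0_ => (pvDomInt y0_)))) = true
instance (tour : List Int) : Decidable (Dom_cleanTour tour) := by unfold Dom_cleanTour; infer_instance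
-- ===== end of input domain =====

-- B replaces A's flag-carrying linear pass by a divide-and-conquer recursion on halves.
-- Both Pythons mutate the argument list in place; the equivalence proved here is about the return value.

-- ===== PORT A =====
-- A's while loop over indices with a `zero` flag, as structural recursion carrying the flag:
-- if the flag is set the element is overwritten with 0; the flag is set when the (possibly
-- overwritten) current element equals 0.
def cleanTourGo (zero : Bool) : List Int → List Int
  | [] => []
  | x :: xs =>
    let x' := if zero then 0 else x
    x' :: cleanTourGo (zero || (x' == 0)) xs

def cleanTour (tour : List Int) : List Int := cleanTourGo false tour

-- ===== PORT B =====
-- solve(lo, hi) on the segment, written on the segment's list: returns the cleaned segment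
-- and whether it contains a zero.  Base case: segments of length ≤ 1.  Otherwise split at
-- mid = length / 2 (= (lo+hi)//2 relative to lo); if the cleaned left half reports a zero,
-- the right half becomes all zeros (the for-loop), else recurse on the right half.
def cleanSolve (xs : List Int) : List Int × Bool :=
  if h : xs.length ≤ 1 then
    (xs, match xs with | [] => false | x :: _ => x == 0)
  else
    let mid := xs.length / 2
    let l := xs.take mid
    let r := xs.drop mid
    let lres := cleanSolve l
    if lres.2 then (lres.1 ++ List.replicate r.length 0, true)
    else
      let rres := cleanSolve r
      (lres.1 ++ rres.1, rres.2)
termination_by xs.length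
decreasing_by
  · simp [List.length_take]; omega
  · simp [List.length_drop]; omega

def cleanTour_alt (tour : List Int) : List Int := (cleanSolve tour).1

-- ===== PRECONDITION & SPEC =====
def Spec_cleanTour (tour : List Int) (out : List Int) : Prop := out = cleanTour_alt tour
instance (tour : List Int) (out : List Int) : Decidable (Spec_cleanTour tour out) := by unfold Spec_cleanTour; infer_instance

-- ===== CLAIM (what is proved, stated in full; the proofs are below) =====
def Claim_equal_cleanTour : Prop := ∀ (tour : List Int), Dom_cleanTour tour → Spec_cleanTour tour (cleanTour tour)

-- ===== LEMMAS AND PROOFS =====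

theorem cleanTourGo_true (xs : List Int) : cleanTourGo true xs = List.replicate xs.length 0 := by
  induction xs with
  | nil => rfl
  | cons x xs ih => simp [cleanTourGo, ih, List.replicate]

theorem cleanTourGo_append (l r : List Int) :
    cleanTourGo false (l ++ r) = cleanTourGo false l ++ cleanTourGo (l.contains 0) r := by
  induction l with
  | nil => rfl
  | cons x xs ih =>
    by_cases hx : x = 0
    · subst hx
      simp only [List.cons_append, cleanTourGo]
      simp [cleanTourGo_true]
    · have hx' : ((x:Int) == 0) = false := by simp [hx]
      simp only [List.cons_append, cleanTourGo]
      simp [hx', ih, hx, eq_comm]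

theorem cleanSolve_eq (xs : List Int) :
    cleanSolve xs = (cleanTourGo false xs, xs.contains 0) := by
  induction xs using cleanSolve.induct with
  | case1 xs h =>
    rw [cleanSolve]
    simp only [h, dif_pos]
    match xs with
    | [] => rfl
    | [x] =>
      refine Prod.ext rfl ?_
      show (x == 0) = [x].contains 0
      by_cases hx : x = 0
      · simp [hx]
      · have hx2 : (0:Int) ≠ x := fun e => hx e.symm
        simp [hx, hx2]
    | _ :: _ :: _ => simp at h
  | case2 xs h mid l lres hb ihl =>
    have ihl' : cleanSolve (List.take (xs.length / 2) xs)
        = (cleanTourGo false (List.take (xs.length / 2) xs),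
           (List.take (xs.length / 2) xs).contains 0) := ihl
    have hb' : ((List.take (xs.length / 2) xs).contains 0) = true := by
      have h2 : (cleanSolve (List.take (xs.length / 2) xs)).2 = true := hb
      rw [ihl'] at h2; exact h2
    have hm : (0:Int) ∈ List.take (xs.length / 2) xs := by simpa using hb'
    rw [cleanSolve]
    simp only [h, dif_neg, not_false_iff]
    rw [ihl', hb']
    have hxs : xs = xs.take (xs.length / 2) ++ xs.drop (xs.length / 2) :=
      (List.take_append_drop _ _).symm
    conv_rhs => rw [hxs]
    rw [cleanTourGo_append, hb', cleanTourGo_true]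
    simp
    rw [hxs]
    exact List.mem_append_left _ hm
  | case3 xs h mid l r lres hb ihl ihr =>
    have ihl' : cleanSolve (List.take (xs.length / 2) xs)
        = (cleanTourGo false (List.take (xs.length / 2) xs),
           (List.take (xs.length / 2) xs).contains 0) := ihl
    have ihr' : cleanSolve (List.drop (xs.length / 2) xs)
        = (cleanTourGo false (List.drop (xs.length / 2) xs),
           (List.drop (xs.length / 2) xs).contains 0) := ihr
    have hb' : ((List.take (xs.length / 2) xs).contains 0) = false := by
      have h2 : ¬ (cleanSolve (List.take (xs.length / 2) xs)).2 = true := hb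
      rw [ihl'] at h2; exact Bool.not_eq_true _ |>.mp h2
    have hm : (0:Int) ∉ List.take (xs.length / 2) xs := by simpa using hb'
    rw [cleanSolve]
    simp only [h, dif_neg, not_false_iff]
    rw [ihl', ihr', hb']
    have hxs : xs = xs.take (xs.length / 2) ++ xs.drop (xs.length / 2) :=
      (List.take_append_drop _ _).symm
    conv_rhs => rw [hxs]
    rw [cleanTourGo_append, hb']
    simp
    constructor
    · intro h0
      rw [hxs]
      exact List.mem_append_right _ h0
    · intro h0
      rw [hxs] at h0
      rcases List.mem_append.mp h0 with h1 | h1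
      · exact absurd h1 hm
      · exact h1

-- ===== VERDICT (by name: the statement is the Claim_ definition above) =====
theorem cleanTour_spec : Claim_equal_cleanTour := by
  intro tour _
  unfold Spec_cleanTour cleanTour cleanTour_alt
  rw [cleanSolve_eq]
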